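-- pv_equiv track=rewrite | github.com/YuxianMeng/CorefQA-pytorch | data_loader/conll_data_processor.py | flatten_clusters
-- ===== SOURCE A (Python) =====
-- from typing import List, Tuple
--
-- def flatten_clusters(clusters: List[List[Tuple[int, int]]]) -> Tuple[List[int], List[int], List[Tuple[int, int]], List[int]]:
--     """
--     flattern cluster information
--     :param clusters:
--     :return:
--     """
--     span_starts = []
--     span_ends = []
--     cluster_ids = []
--     mention_span = []
--     for cluster_id, cluster in enumerate(clusters):
--         for start, end in cluster:
--             span_starts.append(start)
--             span_ends.append(end)
--             mention_span.append((start, end))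
--             cluster_ids.append(cluster_id + 1)
--     return span_starts, span_ends, mention_span, cluster_ids
-- ===== SOURCE B (Python) =====
-- def flatten_clusters(clusters):
--     def go(cid, rest):
--         if not rest:
--             return [], [], [], []
--         cluster = rest[0]
--         s_, e_, m_, c_ = go(cid + 1, rest[1:])
--         return ([s for s, _ in cluster] + s_,
--                 [e for _, e in cluster] + e_,
--                 [(s, e) for s, e in cluster] + m_,
--                 [cid] * len(cluster) + c_)
--     return go(1, clusters)
-- ===== Notes on version B (the rewrite author's own statement) =====
-- stated objective: alternative
-- what changed: B recurses over the cluster list, assembling the four result lists back-to-front by prepending each cluster's per-field projections (built as whole-cluster comprehensions) to the recursive tail, instead of A's iterative nested loops appending element by element to four accumulators.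
import Mathlib
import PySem

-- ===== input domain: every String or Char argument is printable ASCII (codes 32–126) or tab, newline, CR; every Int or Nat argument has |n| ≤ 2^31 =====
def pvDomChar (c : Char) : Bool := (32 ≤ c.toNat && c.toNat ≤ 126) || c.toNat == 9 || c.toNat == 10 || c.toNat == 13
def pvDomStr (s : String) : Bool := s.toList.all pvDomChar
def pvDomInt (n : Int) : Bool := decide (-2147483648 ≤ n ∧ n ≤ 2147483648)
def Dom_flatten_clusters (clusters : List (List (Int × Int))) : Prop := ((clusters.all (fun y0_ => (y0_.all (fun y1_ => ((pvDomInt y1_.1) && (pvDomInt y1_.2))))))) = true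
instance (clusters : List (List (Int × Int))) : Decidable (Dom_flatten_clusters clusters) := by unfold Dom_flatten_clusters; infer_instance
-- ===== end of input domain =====

-- B recurses over the cluster list, prepending each cluster's per-field projections to the
-- recursively flattened tail, instead of A's nested loops appending to four accumulators;
-- alternative decomposition, same cost.

-- ===== PORT A =====
def flatten_clusters (clusters : List (List (Int × Int))) : List Int × List Int × (List (Int × Int)) × List Int :=
  (PySem.List.enumerate clusters 0).foldl
    (fun acc p =>
      p.2.foldl
        (fun a se => (a.1 ++ [se.1], a.2.1 ++ [se.2], a.2.2.1 ++ [(se.1, se.2)], a.2.2.2 ++ [p.1 + 1]))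
        acc)
    ([], [], [], [])

-- ===== PORT B =====
def flatten_clusters_go (cid : Int) : List (List (Int × Int)) → List Int × List Int × (List (Int × Int)) × List Int
  | [] => ([], [], [], [])
  | cluster :: rest =>
    let r := flatten_clusters_go (cid + 1) rest
    (cluster.map (·.1) ++ r.1,
     cluster.map (·.2) ++ r.2.1,
     cluster.map (fun se => (se.1, se.2)) ++ r.2.2.1,
     List.replicate cluster.length cid ++ r.2.2.2)

def flatten_clusters_alt (clusters : List (List (Int × Int))) : List Int × List Int × (List (Int × Int)) × List Int :=
  flatten_clusters_go 1 clusters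

-- ===== PRECONDITION & SPEC =====
def Spec_flatten_clusters (clusters : List (List (Int × Int))) (out : List Int × List Int × (List (Int × Int)) × List Int) : Prop := out = flatten_clusters_alt clusters
instance (clusters : List (List (Int × Int))) (out : List Int × List Int × (List (Int × Int)) × List Int) : Decidable (Spec_flatten_clusters clusters out) := by unfold Spec_flatten_clusters; infer_instance

-- ===== CLAIM =====
def Claim_equal_flatten_clusters : Prop := ∀ (clusters : List (List (Int × Int))), Dom_flatten_clusters clusters → Spec_flatten_clusters clusters (flatten_clusters clusters)

-- ===== LEMMAS AND PROOFS =====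

-- A's inner loop over one cluster appends that cluster's four projections to the accumulator.
theorem fc_inner (i : Int) (c : List (Int × Int))
    (acc : List Int × List Int × (List (Int × Int)) × List Int) :
    c.foldl
      (fun a se => (a.1 ++ [se.1], a.2.1 ++ [se.2], a.2.2.1 ++ [(se.1, se.2)], a.2.2.2 ++ [i + 1]))
      acc
    = (acc.1 ++ c.map (·.1), acc.2.1 ++ c.map (·.2),
       acc.2.2.1 ++ c.map (fun se => (se.1, se.2)), acc.2.2.2 ++ List.replicate c.length (i + 1)) := by
  induction c generalizing acc with
  | nil => simp
  | cons h t ih => simp [List.foldl_cons, ih, List.replicate_succ]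

-- A's outer loop starting at index n, from any accumulator, appends B's recursive result for id n+1.
theorem fc_outer (l : List (List (Int × Int))) (n : Int)
    (acc : List Int × List Int × (List (Int × Int)) × List Int) :
    (PySem.List.enumerate l n).foldl
      (fun acc p =>
        p.2.foldl
          (fun a se => (a.1 ++ [se.1], a.2.1 ++ [se.2], a.2.2.1 ++ [(se.1, se.2)], a.2.2.2 ++ [p.1 + 1]))
          acc)
      acc
    = (acc.1 ++ (flatten_clusters_go (n + 1) l).1,
       acc.2.1 ++ (flatten_clusters_go (n + 1) l).2.1,
       acc.2.2.1 ++ (flatten_clusters_go (n + 1) l).2.2.1,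
       acc.2.2.2 ++ (flatten_clusters_go (n + 1) l).2.2.2) := by
  induction l generalizing n acc with
  | nil => simp [flatten_clusters_go, PySem.List.enumerate_nil]
  | cons h t ih =>
    rw [PySem.List.enumerate_cons, List.foldl_cons, fc_inner, ih]
    simp [flatten_clusters_go, List.append_assoc]

-- ===== VERDICT =====
theorem flatten_clusters_spec : Claim_equal_flatten_clusters := by
  intro clusters _
  unfold Spec_flatten_clusters flatten_clusters flatten_clusters_alt
  rw [fc_outer]
  simp
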